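-- pv_equiv track=rewrite | github.com/dmiyakawa/atcoder-workspace | python/library/repeated_squaring.py | repeated_squaring_sum
-- ===== SOURCE A (Python) =====
-- import math
--
-- def repeated_squaring_sum(x, A, p):
--     """(x^A1 + x^A2 ... + x^An) mod p を求める"""
--     a_max = int(math.log2(max(A))) + 1
--     cache = [1, x]
--     i = 2
--     while i <= a_max:
--         cache.append((cache[i - 1] ** 2) % p)
--         i += 1
--     total = 0
--     for a in A:
--         b = format(a, "b")
--         sq = 1
--         for i in range(len(b)):
--             if b[i] == "1":
--                 sq = sq * cache[len(b) - i] % p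
--         total = (total + sq) % p
--     return total
-- ===== SOURCE B (Python) =====
-- def repeated_squaring_sum(x, A, p):
--     total = 0
--     for a in A:
--         total = (total + pow(x, a, p)) % p
--     return total
-- ===== Notes on version B (the rewrite author's own statement) =====
-- stated objective: simpler
-- what changed: B drops A's precomputed table of repeated squares and the per-element binary-string bit walk entirely, accumulating (total + pow(x, a, p)) % p in a single loop over A.
-- outside the precondition, e.g. on repeated_squaring_sum(2, [-1, 3], 5): A returns 0, B returns 1
import Mathlib
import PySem

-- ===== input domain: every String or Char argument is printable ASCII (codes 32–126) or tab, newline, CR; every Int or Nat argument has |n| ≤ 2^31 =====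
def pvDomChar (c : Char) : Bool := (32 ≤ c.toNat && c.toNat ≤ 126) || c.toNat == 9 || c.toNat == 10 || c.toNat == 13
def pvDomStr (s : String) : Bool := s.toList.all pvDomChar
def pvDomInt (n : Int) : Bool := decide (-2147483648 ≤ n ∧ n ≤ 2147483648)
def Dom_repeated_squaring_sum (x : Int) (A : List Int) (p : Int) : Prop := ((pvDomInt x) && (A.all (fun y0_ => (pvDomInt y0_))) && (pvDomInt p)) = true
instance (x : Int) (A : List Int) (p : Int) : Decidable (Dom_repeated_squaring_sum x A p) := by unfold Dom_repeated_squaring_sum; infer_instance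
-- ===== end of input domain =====

-- B replaces A's hand-rolled squaring table and per-element bit walk by a single
-- accumulation of pow(x, a, p) (simpler, one loop instead of a table build plus a
-- nested bit loop); the equivalence is about the return value on Pre_ below.

-- ===== PORT A =====
-- the `while i <= a_max: cache.append((cache[i-1] ** 2) % p)` loop of A
def pvACacheLoop (p : Int) (aMax : Nat) (i : Nat) (cache : List Int) : List Int :=
  if i ≤ aMax then
    pvACacheLoop p aMax (i + 1) (cache ++ [PySem.Int.mod ((cache.getD (i - 1) 0) ^ 2) p])
  else cache
termination_by aMax + 1 - i

-- one iteration of A's `for a in A` loop (the body kept exactly as in the Python):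
-- b = format(a, "b"); the inner `for i in range(len(b))` bit walk; total = (total + sq) % p.
-- b[i] is always in range (i < len(b)); cache[len(b) - i] raises IndexError for Python
-- when out of range — that happens only outside Pre_, the port uses getD there.
def pvAStep (cache : List Int) (p : Int) (total : Int) (a : Int) : Int :=
  let b := PySem.Int.toBinChars a
  let sq := (List.range b.length).foldl
    (fun sq i => if b.getD i ' ' = '1' then PySem.Int.mod (sq * cache.getD (b.length - i) 0) p else sq) 1
  PySem.Int.mod (total + sq) p

def repeated_squaring_sum (x : Int) (A : List Int) (p : Int) : Int :=
  -- max(A): ValueError on empty A (outside Pre_).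
  let m := (PySem.List.max? A (fun y => y)).getD 0
  -- a_max = int(math.log2(max(A))) + 1: exact as Nat.log2 for 1 ≤ max(A) ≤ 2^31 (Dom);
  -- Python raises (math domain error) for max(A) ≤ 0, which is outside Pre_.
  let a_max : Nat := Nat.log2 m.toNat + 1
  let cache := pvACacheLoop p a_max 2 [1, x]
  A.foldl (pvAStep cache p) 0

-- ===== PORT B =====
-- one iteration of B's loop: total = (total + pow(x, a, p)) % p.
-- pow(x, a, p) = PySem.Int.powMod x a.toNat p for 0 ≤ a (Pre_); a negative a would make
-- Python's pow take modular-inverse semantics, which is outside Pre_.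
def pvBStep (x : Int) (p : Int) (total : Int) (a : Int) : Int :=
  PySem.Int.mod (total + PySem.Int.powMod x a.toNat p) p

def repeated_squaring_sum_alt (x : Int) (A : List Int) (p : Int) : Int :=
  A.foldl (pvBStep x p) 0

-- ===== PRECONDITION & SPEC =====
-- Pre_ excludes p = 0 and lists with max(A) ≤ 0 (including []), where A raises
-- (ZeroDivisionError / ValueError); it also excludes lists containing a negative
-- exponent — an unspecified corner of the docstring "(x^A1 + … + x^An) mod p" on which
-- A's sign-blind bit walk either raises IndexError or accidentally returns x^|a| mod p,
-- while B's pow reads a < 0 as a modular inverse and raises ValueError whenever x is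
-- not invertible mod p.
def Pre_repeated_squaring_sum (x : Int) (A : List Int) (p : Int) : Prop :=
  p ≠ 0 ∧ (∀ a ∈ A, 0 ≤ a) ∧ (∃ a ∈ A, 1 ≤ a)
instance (x : Int) (A : List Int) (p : Int) : Decidable (Pre_repeated_squaring_sum x A p) := by
  unfold Pre_repeated_squaring_sum; infer_instance

def pvWitness_repeated_squaring_sum : Int × List Int × Int := (2, ([3, 0, 5], 7))

def Spec_repeated_squaring_sum (x : Int) (A : List Int) (p : Int) (out : Int) : Prop := out = repeated_squaring_sum_alt x A p
instance (x : Int) (A : List Int) (p : Int) (out : Int) : Decidable (Spec_repeated_squaring_sum x A p out) := by unfold Spec_repeated_squaring_sum; infer_instance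

-- ===== CLAIM (what is proved, stated in full; the proofs are below) =====
def Claim_equal_repeated_squaring_sum : Prop := ∀ (x : Int) (A : List Int) (p : Int), Dom_repeated_squaring_sum x A p → Pre_repeated_squaring_sum x A p → Spec_repeated_squaring_sum x A p (repeated_squaring_sum x A p)

-- ===== LEMMAS AND PROOFS =====

-- PySem.Int.mod is Int.fmod
theorem pvmod_eq (a b : Int) : PySem.Int.mod a b = a.fmod b := rfl

theorem pv_fmod_fmod (y p : Int) : (y.fmod p).fmod p = y.fmod p :=
  Int.fmod_fmod_of_dvd y dvd_rfl

theorem pv_fmod_add_absorb (t s p : Int) : (t + s.fmod p).fmod p = (t + s).fmod p := by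
  conv_rhs => rw [← Int.mul_fdiv_add_fmod s p]
  rw [show t + (p * s.fdiv p + s.fmod p) = t + s.fmod p + p * s.fdiv p by ring,
    Int.add_mul_fmod_self_left]

theorem pv_fmod_mul_absorb (a b p : Int) : ((a.fmod p) * b).fmod p = (a * b).fmod p := by
  conv_rhs => rw [← Int.mul_fdiv_add_fmod a p]
  rw [show (p * a.fdiv p + a.fmod p) * b = a.fmod p * b + p * (a.fdiv p * b) by ring,
    Int.add_mul_fmod_self_left]

theorem pv_fmod_mul_congr {p a a' b b' : Int} (h1 : a.fmod p = a'.fmod p)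
    (h2 : b.fmod p = b'.fmod p) : (a * b).fmod p = (a' * b').fmod p := by
  rw [← pv_fmod_mul_absorb a b p, h1, pv_fmod_mul_absorb, mul_comm a' b,
    ← pv_fmod_mul_absorb b a' p, h2, pv_fmod_mul_absorb, mul_comm]

-- the binary digits of n, MSB first (= Nat.toDigits 2 n, proved below)
def pvBinChars (n : Nat) : List Char :=
  if n < 2 then [Nat.digitChar n]
  else pvBinChars (n / 2) ++ [Nat.digitChar (n % 2)]
decreasing_by omega

theorem pv_toDigitsCore_eq (fuel : Nat) : ∀ (n : Nat) (ds : List Char), n < fuel →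
    Nat.toDigitsCore 2 fuel n ds = pvBinChars n ++ ds := by
  induction fuel with
  | zero => intro n ds h; omega
  | succ f ih =>
    intro n ds h
    rw [Nat.toDigitsCore]
    by_cases h2 : n / 2 = 0
    · rw [if_pos h2, pvBinChars, if_pos (by omega), Nat.mod_eq_of_lt (by omega)]
      rfl
    · rw [if_neg h2, ih (n / 2) _ (by omega)]
      conv_rhs => rw [pvBinChars, if_neg (by omega)]
      simp

theorem pv_toDigits_two (n : Nat) : Nat.toDigits 2 n = pvBinChars n := by
  rw [Nat.toDigits, pv_toDigitsCore_eq (n + 1) n [] (by omega), List.append_nil]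

-- A's inner bit walk, rephrased as structural recursion on the digit list;
-- s is the shift of the cache index contributed by digits to the right of the slice.
def pvG (c : List Int) (p : Int) : List Char → Nat → Int → Int
  | [], _, sq => sq
  | d :: rest, s, sq =>
      pvG c p rest s
        (if d = '1' then PySem.Int.mod (sq * c.getD (rest.length + 1 + s) 0) p else sq)

theorem pv_foldRange_eq_pvG (c : List Int) (p : Int) : ∀ (b : List Char) (s : Nat) (sq : Int),
    (List.range b.length).foldl
      (fun sq i => if b.getD i ' ' = '1' then PySem.Int.mod (sq * c.getD (b.length - i + s) 0) p else sq) sq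
      = pvG c p b s sq := by
  intro b
  induction b with
  | nil => intro s sq; simp [pvG]
  | cons d rest ih =>
    intro s sq
    rw [List.length_cons, List.range_succ_eq_map, List.foldl_cons, List.foldl_map, pvG]
    have hfun : ∀ (sq : Int) (j : Nat),
        (if (d :: rest).getD (j + 1) ' ' = '1'
          then PySem.Int.mod (sq * c.getD (rest.length + 1 - (j + 1) + s) 0) p else sq)
        = (if rest.getD j ' ' = '1'
          then PySem.Int.mod (sq * c.getD (rest.length - j + s) 0) p else sq) := by
      intro sq j
      rw [List.getD_cons_succ, Nat.succ_sub_succ]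
    simp only [List.getD_cons_zero, Nat.sub_zero, Nat.succ_eq_add_one, hfun]
    exact ih s _

theorem pv_foldRange_eq_pvG0 (c : List Int) (p : Int) (b : List Char) (sq : Int) :
    (List.range b.length).foldl
      (fun sq i => if b.getD i ' ' = '1' then PySem.Int.mod (sq * c.getD (b.length - i) 0) p else sq) sq
      = pvG c p b 0 sq := by
  have h := pv_foldRange_eq_pvG c p b 0 sq
  simpa using h

theorem pvG_append (c : List Int) (p : Int) : ∀ (b1 b2 : List Char) (s : Nat) (sq : Int),
    pvG c p (b1 ++ b2) s sq = pvG c p b2 s (pvG c p b1 (b2.length + s) sq) := by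
  intro b1
  induction b1 with
  | nil => intro b2 s sq; simp [pvG]
  | cons d rest ih =>
    intro b2 s sq
    rw [List.cons_append, pvG, pvG,
      show (rest ++ b2).length + 1 + s = rest.length + 1 + (b2.length + s) by
        simp [List.length_append]; omega,
      ih]

theorem pvG_binChars (c : List Int) (p x : Int) (aMax : Nat)
    (hc : ∀ k, 1 ≤ k → k ≤ aMax → (c.getD k 0).fmod p = (x ^ (2 ^ (k - 1))).fmod p) :
    ∀ n, ∀ (s : Nat) (sq : Int), (n = 0 ∨ Nat.log2 n + 1 + s ≤ aMax) →
      (pvG c p (pvBinChars n) s sq).fmod p = (sq * x ^ (n * 2 ^ s)).fmod p := by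
  intro n
  induction n using Nat.strong_induction_on with
  | _ n IH =>
    intro s sq hb
    rw [pvBinChars]
    by_cases h2 : n < 2
    · rw [if_pos h2]
      match n, h2 with
      | 0, _ =>
        simp [pvG, show Nat.digitChar 0 = '0' from rfl]
      | 1, _ =>
        have hk : 1 + s ≤ aMax := by
          rcases hb with hb | hb
          · omega
          · simpa [Nat.log2] using hb
        rw [show Nat.digitChar 1 = '1' from rfl, pvG, if_pos rfl, pvG, List.length_nil,
          pvmod_eq, pv_fmod_fmod,
          pv_fmod_mul_congr (rfl : sq.fmod p = sq.fmod p) (hc (0 + 1 + s) (by omega) (by omega)),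
          one_mul]
        norm_num
    · rw [if_neg h2, pvG_append]
      have hl : Nat.log2 n = Nat.log2 (n / 2) + 1 := by
        rw [Nat.log2_def, if_pos (by omega)]
      have hb' : Nat.log2 n + 1 + s ≤ aMax := by
        rcases hb with hb | hb
        · omega
        · exact hb
      have hrec := IH (n / 2) (by omega) (1 + s) sq (Or.inr (by omega))
      have hm2 : n % 2 = 0 ∨ n % 2 = 1 := by omega
      rcases hm2 with hm | hm
      · rw [hm, show Nat.digitChar 0 = '0' from rfl, pvG, if_neg (by decide), pvG, List.length_singleton]
        rw [hrec, show n / 2 * 2 ^ (1 + s) = n * 2 ^ s by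
          rw [pow_add, pow_one]
          conv_rhs => rw [show n = 2 * (n / 2) from by omega]
          ring]
      · have hlog1 : 1 ≤ Nat.log2 n := by omega
        rw [hm, show Nat.digitChar 1 = '1' from rfl, pvG, if_pos rfl, pvG, List.length_singleton,
          List.length_nil, pvmod_eq, pv_fmod_fmod,
          pv_fmod_mul_congr hrec (hc (0 + 1 + s) (by omega) (by omega)),
          mul_assoc, ← pow_add,
          show n / 2 * 2 ^ (1 + s) + 2 ^ (0 + 1 + s - 1) = n * 2 ^ s by
            have hs : 0 + 1 + s - 1 = s := by omega
            rw [hs, pow_add, pow_one]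
            conv_rhs => rw [show n = 2 * (n / 2) + 1 from by omega]
            ring]

theorem pvACacheLoop_spec (x p : Int) (aMax : Nat) : ∀ (fuel i : Nat) (cache : List Int),
    aMax + 1 - i = fuel → 2 ≤ i → cache.length = i →
    (∀ k, 1 ≤ k → k < i → (cache.getD k 0).fmod p = (x ^ (2 ^ (k - 1))).fmod p) →
    ∀ k, 1 ≤ k → k ≤ aMax →
      ((pvACacheLoop p aMax i cache).getD k 0).fmod p = (x ^ (2 ^ (k - 1))).fmod p := by
  intro fuel
  induction fuel with
  | zero =>
    intro i cache hf hi hlen hinv k hk1 hk2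
    rw [pvACacheLoop, if_neg (by omega : ¬ i ≤ aMax)]
    exact hinv k hk1 (by omega)
  | succ f ih =>
    intro i cache hf hi hlen hinv k hk1 hk2
    have hle : i ≤ aMax := by omega
    rw [pvACacheLoop, if_pos hle]
    refine ih (i + 1) _ (by omega) (by omega) (by simp [hlen]) ?_ k hk1 hk2
    intro k' hk1' hk2'
    by_cases hk' : k' < i
    · rw [List.getD_append _ _ _ _ (by omega)]
      exact hinv k' hk1' hk'
    · have hk'' : k' = i := by omega
      subst hk''
      rw [List.getD_append_right _ _ _ _ (by omega), hlen, Nat.sub_self]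
      show (PySem.Int.mod ((cache.getD (k' - 1) 0) ^ 2) p).fmod p = _
      have hprev := hinv (k' - 1) (by omega) (by omega)
      have hk2'' : 2 ≤ k' := by omega
      rw [pvmod_eq, pv_fmod_fmod, pow_two, pv_fmod_mul_congr hprev hprev, ← pow_add,
        show 2 ^ (k' - 1 - 1) + 2 ^ (k' - 1 - 1) = 2 ^ (k' - 1) by
          obtain ⟨j, hj⟩ : ∃ j, k' - 1 = j + 1 := ⟨k' - 2, by omega⟩
          rw [hj, Nat.add_sub_cancel, pow_succ]; omega]

theorem pv_step_eq (x p : Int) (cache : List Int) (aMax : Nat)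
    (hc : ∀ k, 1 ≤ k → k ≤ aMax → (cache.getD k 0).fmod p = (x ^ (2 ^ (k - 1))).fmod p)
    (a : Int) (ha0 : 0 ≤ a) (hbnd : a.toNat = 0 ∨ Nat.log2 a.toNat + 1 ≤ aMax)
    (t : Int) : pvAStep cache p t a = pvBStep x p t a := by
  unfold pvAStep pvBStep
  have hbin : PySem.Int.toBinChars a = pvBinChars a.toNat := by
    unfold PySem.Int.toBinChars
    rw [if_neg (by omega), pv_toDigits_two]
  simp only [hbin]
  rw [pv_foldRange_eq_pvG0]
  have hG := pvG_binChars cache p x aMax hc a.toNat 0 1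
    (by
      rcases hbnd with h | h
      · exact Or.inl h
      · exact Or.inr (by omega))
  rw [PySem.Int.powMod, pvmod_eq, pvmod_eq, pvmod_eq,
    pv_fmod_add_absorb t (x ^ a.toNat) p, ← pv_fmod_add_absorb t (pvG cache p (pvBinChars a.toNat) 0 1) p,
    hG, pv_fmod_add_absorb]
  norm_num

theorem pv_main_fold (x p : Int) (A : List Int) (cache : List Int) (aMax : Nat)
    (hc : ∀ k, 1 ≤ k → k ≤ aMax → (cache.getD k 0).fmod p = (x ^ (2 ^ (k - 1))).fmod p)
    (hnn : ∀ a ∈ A, 0 ≤ a)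
    (hbnd : ∀ a ∈ A, a.toNat = 0 ∨ Nat.log2 a.toNat + 1 ≤ aMax) :
    A.foldl (pvAStep cache p) 0 = A.foldl (pvBStep x p) 0 := by
  apply PySem.List.foldl_congr_mem
  intro t a ha
  exact pv_step_eq x p cache aMax hc a (hnn a ha) (hbnd a ha) t

-- ===== VERDICT (by name: the statement is the Claim_ definition above) =====
theorem repeated_squaring_sum_spec : Claim_equal_repeated_squaring_sum := by
  intro x A p hdom hpre
  obtain ⟨hp, hnn, a1, ha1m, ha11⟩ := hpre
  have hAne : A ≠ [] := by intro h; subst h; simp at ha1m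
  obtain ⟨m0, hm0⟩ : ∃ m0, PySem.List.max? A (fun y => y) = some m0 := by
    cases h : PySem.List.max? A (fun y => y) with
    | none => exact absurd ((PySem.List.max?_eq_none_iff A _).mp h) hAne
    | some m0 => exact ⟨m0, rfl⟩
  have hmax := PySem.List.max?_isMax hm0
  show repeated_squaring_sum x A p = repeated_squaring_sum_alt x A p
  unfold repeated_squaring_sum repeated_squaring_sum_alt
  simp only [hm0, Option.getD_some]
  apply pv_main_fold x p A _ (Nat.log2 m0.toNat + 1)
  · intro k hk1 hk2
    apply pvACacheLoop_spec x p _ (Nat.log2 m0.toNat + 1 + 1 - 2) 2 [1, x] rfl (le_refl 2) rfl _ k hk1 hk2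
    intro k' hk1' hk2'
    have hk'' : k' = 1 := by omega
    subst hk''
    simp
  · exact hnn
  · intro a ha
    by_cases h0 : a.toNat = 0
    · exact Or.inl h0
    · refine Or.inr ?_
      have hle : a.toNat ≤ m0.toNat := Int.toNat_le_toNat (hmax a ha)
      have := Nat.log_mono_right (b := 2) hle
      simp only [← Nat.log2_eq_log_two] at this
      omega
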